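-- pv_equiv track=rewrite | github.com/mastermanas805/Atlantis_Assement | wikipedia.py | processpara
-- ===== SOURCE A (Python) =====
-- def processpara(text):
--     text = text.split(" ")
--     res = [0,0,0]
--     for i in text:
--         if len(i) == 3:
--             res[0]+=1
--         elif len(i) == 4:
--             res[1]+=1
--         elif len(i) == 5:
--             res[2]+=1
--     return res
-- ===== SOURCE B (Python) =====
-- def processpara(text):
--     res = [0, 0, 0]
--     cur = 0
--     for ch in text:
--         if ch == " ":
--             if 3 <= cur <= 5:
--                 res[cur - 3] += 1
--             cur = 0
--         else:
--             cur += 1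
--     if 3 <= cur <= 5:
--         res[cur - 3] += 1
--     return res
-- ===== Notes on version B (the rewrite author's own statement) =====
-- stated objective: alternative
-- what changed: B never splits the text into a word list: it streams over the characters once, keeping only the current run length between spaces and tallying a run when a space or the end of the string closes it, whereas A materialises the split word list and branches on each word's length.
import Mathlib
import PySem

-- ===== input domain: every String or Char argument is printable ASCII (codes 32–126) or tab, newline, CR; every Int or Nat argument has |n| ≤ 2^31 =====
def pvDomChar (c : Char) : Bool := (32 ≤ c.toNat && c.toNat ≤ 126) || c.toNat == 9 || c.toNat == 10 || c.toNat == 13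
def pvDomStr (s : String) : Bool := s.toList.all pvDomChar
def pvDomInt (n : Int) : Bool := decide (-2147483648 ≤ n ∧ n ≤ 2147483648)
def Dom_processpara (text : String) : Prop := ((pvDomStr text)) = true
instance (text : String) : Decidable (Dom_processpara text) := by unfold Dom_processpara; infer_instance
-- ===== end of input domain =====

-- B streams over the characters once, tallying the current run length at each space / at the end,
-- instead of A's split into a word list followed by per-word if/elif branching.

-- ===== PORT A =====
-- literal port of A: res = [0,0,0]; for i in text.split(" "): if len==3 res[0]+=1 elif len==4 res[1]+=1 elif len==5 res[2]+=1
def pvStepA (res : List Int) (i : String) : List Int :=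
  if PySem.Str.len i = 3 then PySem.List.pySetD res 0 (PySem.List.pyGetD res 0 0 + 1)
  else if PySem.Str.len i = 4 then PySem.List.pySetD res 1 (PySem.List.pyGetD res 1 0 + 1)
  else if PySem.Str.len i = 5 then PySem.List.pySetD res 2 (PySem.List.pyGetD res 2 0 + 1)
  else res

def processpara (text : String) : List Int :=
  let words := (PySem.Str.split? text " ").getD []
  words.foldl pvStepA [0, 0, 0]

-- ===== PORT B =====
-- literal port of Source B: if 3 <= cur <= 5: res[cur-3] += 1
def pvTallyB (res : List Int) (cur : Int) : List Int :=
  if 3 ≤ cur ∧ cur ≤ 5 then PySem.List.pySetD res (cur - 3) (PySem.List.pyGetD res (cur - 3) 0 + 1)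
  else res

-- the loop body: on a space, close the current run; otherwise extend it
def pvStepB (st : List Int × Int) (ch : Char) : List Int × Int :=
  if ch = ' ' then (pvTallyB st.1 st.2, 0) else (st.1, st.2 + 1)

def processpara_alt (text : String) : List Int :=
  let st := text.toList.foldl pvStepB ([0, 0, 0], 0)
  pvTallyB st.1 st.2

-- ===== PRECONDITION & SPEC =====
def Spec_processpara (text : String) (out : List Int) : Prop := out = processpara_alt text
instance (text : String) (out : List Int) : Decidable (Spec_processpara text out) := by unfold Spec_processpara; infer_instance

-- ===== CLAIM =====
def Claim_equal_processpara : Prop := ∀ (text : String), Dom_processpara text → Spec_processpara text (processpara text)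

-- ===== LEMMAS AND PROOFS =====

-- the words produced by Python's split(" "), accumulator style (reversed current word)
def pvWords (cur : List Char) : List Char → List (List Char)
  | [] => [cur.reverse]
  | c :: cs => if c = ' ' then cur.reverse :: pvWords [] cs else pvWords (c :: cur) cs

-- the word lengths, with r the length of the word in progress
def pvLens (r : Nat) : List Char → List Nat
  | [] => [r]
  | c :: cs => if c = ' ' then r :: pvLens 0 cs else pvLens (r + 1) cs

theorem pvGo_eq (fuel : Nat) : ∀ (l cur : List Char) (acc : List (List Char)), l.length < fuel →
    PySem.Chars.splitOn.go [' '] fuel l cur acc = acc.reverse ++ pvWords cur l := by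
  induction fuel with
  | zero => intro l cur acc h; omega
  | succ n ih =>
    intro l cur acc h
    cases l with
    | nil => simp [PySem.Chars.splitOn.go, pvWords]
    | cons c cs =>
      rw [PySem.Chars.splitOn.go]
      simp only [List.length_cons] at h
      by_cases hc : c = ' '
      · subst hc
        simp only [List.isPrefixOf, Bool.and_true, beq_self_eq_true, if_pos, List.length_cons,
          List.length_nil, List.drop_succ_cons, List.drop_zero, pvWords]
        rw [ih cs [] (cur.reverse :: acc) (by omega)]
        simp
      · have hp : List.isPrefixOf [' '] (c :: cs) = false := by
          simp [List.isPrefixOf]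
          exact fun hh => absurd hh.symm hc
        rw [hp]
        simp only [Bool.false_eq_true, if_false, pvWords, if_neg hc]
        exact ih cs (c :: cur) acc (by omega)

theorem pvSplitOn_eq (tl : List Char) : PySem.Chars.splitOn tl [' '] = pvWords [] tl := by
  unfold PySem.Chars.splitOn
  rw [pvGo_eq (tl.length + 1) tl [] [] (by omega)]
  simp

theorem pvWords_lens (l : List Char) : ∀ (cur : List Char),
    (pvWords cur l).map List.length = pvLens cur.length l := by
  induction l with
  | nil => intro cur; simp [pvWords, pvLens]
  | cons c cs ih =>
    intro cur
    by_cases hc : c = ' '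
    · simp [pvWords, pvLens, hc, ih]
    · simpa [pvWords, pvLens, hc] using ih (c :: cur)

theorem pvStepA_eval (a b c : Int) (w : String) :
    pvStepA [a, b, c] w =
      if PySem.Str.len w = 3 then [a + 1, b, c]
      else if PySem.Str.len w = 4 then [a, b + 1, c]
      else if PySem.Str.len w = 5 then [a, b, c + 1]
      else [a, b, c] := by
  unfold pvStepA
  split_ifs <;>
    simp [PySem.List.pySetD, PySem.List.pySet?, PySem.List.pyGetD, PySem.List.pyGet?,
      PySem.List.pyIdx?, add_comm]

theorem pvA_loop (ws : List String) (a b c : Int) :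
    ws.foldl pvStepA [a, b, c]
    = [a + ((ws.map PySem.Str.len).count 3 : Int),
       b + ((ws.map PySem.Str.len).count 4 : Int),
       c + ((ws.map PySem.Str.len).count 5 : Int)] := by
  induction ws generalizing a b c with
  | nil => simp
  | cons w ws ih =>
    rw [List.foldl_cons, pvStepA_eval]
    simp only [PySem.Str.len_eq, String.length_toList] at *
    split_ifs with h3 h4 h5 <;> simp [*] <;> ring

theorem pvTallyB_eval (a b c x : Int) :
    pvTallyB [a, b, c] x =
      if x = 3 then [a + 1, b, c]
      else if x = 4 then [a, b + 1, c]
      else if x = 5 then [a, b, c + 1]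
      else [a, b, c] := by
  unfold pvTallyB
  by_cases h3 : x = 3
  · subst h3
    simp [PySem.List.pySetD, PySem.List.pySet?, PySem.List.pyGetD, PySem.List.pyGet?,
      PySem.List.pyIdx?, add_comm]
  · by_cases h4 : x = 4
    · subst h4
      norm_num [PySem.List.pySetD, PySem.List.pySet?, PySem.List.pyGetD, PySem.List.pyGet?,
        PySem.List.pyIdx?, add_comm]
    · by_cases h5 : x = 5
      · subst h5
        norm_num [PySem.List.pySetD, PySem.List.pySet?, PySem.List.pyGetD, PySem.List.pyGet?,
          PySem.List.pyIdx?]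
        simp only [show Int.toNat 2 = 2 from rfl]
        simp [List.set]
      · have : ¬ (3 ≤ x ∧ x ≤ 5) := by omega
        simp [this, h3, h4, h5]

theorem pvB_loop (l : List Char) : ∀ (a b c : Int) (r : Nat),
    pvTallyB (l.foldl pvStepB ([a, b, c], (r : Int))).1 (l.foldl pvStepB ([a, b, c], (r : Int))).2
    = [a + ((pvLens r l).count 3 : Int),
       b + ((pvLens r l).count 4 : Int),
       c + ((pvLens r l).count 5 : Int)] := by
  induction l with
  | nil =>
    intro a b c r
    rw [List.foldl_nil, pvTallyB_eval]
    simp only [pvLens, List.count_cons, List.count_nil]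
    rcases Nat.lt_or_ge r 3 with h | h
    · interval_cases r <;> norm_num
    · rcases Nat.lt_or_ge r 6 with h6 | h6
      · interval_cases r <;> norm_num
      · have : ¬ ((r : Int) = 3) ∧ ¬ ((r : Int) = 4) ∧ ¬ ((r : Int) = 5) := by omega
        have h3 : ¬ (r = 3) ∧ ¬ (r = 4) ∧ ¬ (r = 5) := by omega
        simp [this.1, this.2.1, this.2.2, h3.1, h3.2.1, h3.2.2]
  | cons ch cs ih =>
    intro a b c r
    rw [List.foldl_cons]
    by_cases hc : ch = ' '
    · subst hc
      have hstep : pvStepB ([a, b, c], (r : Int)) ' ' = (pvTallyB [a, b, c] (r : Int), ((0 : Nat) : Int)) := by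
        simp [pvStepB]
      rw [hstep, pvTallyB_eval]
      split_ifs with h3 h4 h5
      · rw [ih (a + 1) b c 0]
        have hr : r = 3 := by omega
        subst hr
        simp only [pvLens, List.cons.injEq, and_true]
        refine ⟨?_, ?_, ?_⟩ <;> simp [List.count_cons] <;> ring
      · rw [ih a (b + 1) c 0]
        have hr : r = 4 := by omega
        subst hr
        simp only [pvLens, List.cons.injEq, and_true]
        refine ⟨?_, ?_, ?_⟩ <;> simp [List.count_cons] <;> ring
      · rw [ih a b (c + 1) 0]
        have hr : r = 5 := by omega
        subst hr
        simp only [pvLens, List.cons.injEq, and_true]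
        refine ⟨?_, ?_, ?_⟩ <;> simp [List.count_cons] <;> ring
      · rw [ih a b c 0]
        have hr : ¬ r = 3 ∧ ¬ r = 4 ∧ ¬ r = 5 := by omega
        simp only [pvLens, List.cons.injEq, and_true]
        simp [hr.1, hr.2.1, hr.2.2]
    · simp only [pvStepB, if_neg hc, pvLens]
      have hcast : ((r : Int) + 1) = ((r + 1 : Nat) : Int) := by push_cast; ring
      rw [hcast, ih]

-- ===== VERDICT =====
theorem processpara_spec : Claim_equal_processpara := by
  intro text _
  unfold Spec_processpara processpara processpara_alt
  -- identify A's word list with pvWords over the characters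
  have hsplit := PySem.Str.split?_map text " "
  rw [show (" ".toList) = [' '] from rfl] at hsplit
  rw [show PySem.Chars.split? text.toList [' ']
        = some (PySem.Chars.splitOn text.toList [' ']) from rfl, pvSplitOn_eq] at hsplit
  obtain ⟨ws, hws, hmap⟩ := Option.map_eq_some_iff.mp hsplit
  rw [hws]
  simp only [Option.getD_some]
  rw [pvA_loop]
  have hB := pvB_loop text.toList 0 0 0 0
  rw [show ((0 : Nat) : Int) = (0 : Int) from rfl] at hB
  rw [hB]
  -- both sides are the 3/4/5 counts of the same list of word lengths
  have hlen : PySem.Str.len = (fun s : String => ((s.toList.length : Nat) : Int)) := by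
    funext s; simp [PySem.Str.len_eq]
  have hlens : ws.map PySem.Str.len = (pvLens 0 text.toList).map (fun n : Nat => (n : Int)) := by
    have hw := pvWords_lens text.toList []
    simp only [List.length_nil] at hw
    rw [← hw, ← hmap, hlen, List.map_map, List.map_map]
    rfl
  rw [hlens]
  have hinj : Function.Injective (fun n : Nat => (n : Int)) := fun x y h => by
    simpa using h
  have c3 := List.count_map_of_injective (x := 3) (pvLens 0 text.toList) _ hinj
  have c4 := List.count_map_of_injective (x := 4) (pvLens 0 text.toList) _ hinj
  have c5 := List.count_map_of_injective (x := 5) (pvLens 0 text.toList) _ hinj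
  simp only [Nat.cast_ofNat] at c3 c4 c5
  rw [c3, c4, c5]
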